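-- pv_equiv track=rewrite | github.com/miniyk2012/leetcode | interestings/interview40/ipv4.py | provide_all_seem_ipv4s
-- ===== SOURCE A (Python) =====
-- def provide_all_seem_ipv4s(text):
--     """给出所有xx.xx.xx.xx形式的子字符串"""
--     i = 0
--     while True:
--         if i >= len(text):
--             break
--         dot_num = 0
--         for j in range(i, len(text)):
--             if text[j] == '.':
--                 dot_num += 1
--             if dot_num == 3:
--                 yield text[i:j + 1]
--             if dot_num == 4:
--                 i += 1
--                 break
--         else:
--             i += 1
-- ===== SOURCE B (Python) =====
-- def provide_all_seem_ipv4s(text):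
--     """给出所有xx.xx.xx.xx形式的子字符串"""
--     n = len(text)
--     dots = [j for j in range(n) if text[j] == '.']
--     m = len(dots)
--     k = 0  # number of dots at positions < i
--     for i in range(n):
--         while k < m and dots[k] < i:
--             k += 1
--         if k + 2 < m:
--             third = dots[k + 2]
--             stop = dots[k + 3] if k + 3 < m else n
--             for j in range(third, stop):
--                 yield text[i:j + 1]
-- ===== Notes on version B (the rewrite author's own statement) =====
-- stated objective: faster
-- what changed: A rescans from every start position to find its 3rd/4th dot; B precomputes the list of dot positions once and walks an advancing pointer over it, emitting each yield run directly from the stored positions.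
import Mathlib
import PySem

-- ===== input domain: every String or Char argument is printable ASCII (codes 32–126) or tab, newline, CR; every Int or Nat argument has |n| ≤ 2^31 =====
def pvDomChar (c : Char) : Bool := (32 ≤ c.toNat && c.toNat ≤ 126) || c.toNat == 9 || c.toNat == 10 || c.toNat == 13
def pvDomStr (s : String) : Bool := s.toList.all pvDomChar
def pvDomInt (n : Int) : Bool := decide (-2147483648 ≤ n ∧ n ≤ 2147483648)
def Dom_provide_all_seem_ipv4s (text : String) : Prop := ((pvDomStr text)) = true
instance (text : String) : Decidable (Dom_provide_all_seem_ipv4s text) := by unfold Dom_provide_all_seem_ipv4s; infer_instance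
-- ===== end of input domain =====

-- B replaces A's per-start rescans with one precomputed list of dot positions and an
-- advancing pointer, emitting each run of yields directly (objective: faster).
-- Both ports return the Python generator's yields, collected in order as a list.

-- ===== PORT A =====
-- inner `for j in range(i, len(text))` loop of A; yields are appended to acc.
-- text[i:j+1] with 0 ≤ i ≤ j < len(text) is exactly (cs.drop i).take (j+1-i).
def pvA_inner (cs : List Char) (i j dotNum : Nat) (acc : List String) : List String :=
  if h : j < cs.length then
    let d := if cs[j] = '.' then dotNum + 1 else dotNum
    let acc2 := if d = 3 then acc ++ [String.ofList ((cs.drop i).take (j + 1 - i))] else acc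
    if d = 4 then acc2 else pvA_inner cs i (j + 1) d acc2
  else acc
termination_by cs.length - j

-- outer `while True` loop; both the `dot_num == 4` break and the for-else set i to i+1.
def pvA_outer (cs : List Char) (i : Nat) (acc : List String) : List String :=
  if i < cs.length then pvA_outer cs (i + 1) (pvA_inner cs i i 0 acc)
  else acc
termination_by cs.length - i

def provide_all_seem_ipv4s (text : String) : List String :=
  pvA_outer text.toList 0 []

-- ===== PORT B =====
-- `while k < m and dots[k] < i: k += 1`
def pvB_adv (dots : List Nat) (i k : Nat) : Nat :=
  if h : k < dots.length then
    if dots[k] < i then pvB_adv dots i (k + 1) else k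
  else k
termination_by dots.length - k

-- `for i in range(n)` loop of B; the inner `for j in range(third, stop)` is the map.
def pvB_loop (cs : List Char) (dots : List Nat) (i k : Nat) (acc : List String) : List String :=
  if i < cs.length then
    let k' := pvB_adv dots i k
    let ys :=
      if h : k' + 2 < dots.length then
        let third := dots[k' + 2]
        let stop := if h3 : k' + 3 < dots.length then dots[k' + 3] else cs.length
        (List.range' third (stop - third)).map
          (fun q => String.ofList ((cs.drop i).take (q + 1 - i)))
      else []
    pvB_loop cs dots (i + 1) k' (acc ++ ys)
  else acc
termination_by cs.length - i

def provide_all_seem_ipv4s_alt (text : String) : List String :=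
  let cs := text.toList
  -- dots = [j for j in range(n) if text[j] == '.']
  let dots := (List.range cs.length).filter (fun j => cs[j]! == '.')
  pvB_loop cs dots 0 0 []

-- ===== PRECONDITION & SPEC =====
def Spec_provide_all_seem_ipv4s (text : String) (out : List String) : Prop := out = provide_all_seem_ipv4s_alt text
instance (text : String) (out : List String) : Decidable (Spec_provide_all_seem_ipv4s text out) := by unfold Spec_provide_all_seem_ipv4s; infer_instance

-- ===== CLAIM (what is proved, stated in full; the proofs are below) =====
def Claim_equal_provide_all_seem_ipv4s : Prop := ∀ (text : String), Dom_provide_all_seem_ipv4s text → Spec_provide_all_seem_ipv4s text (provide_all_seem_ipv4s text)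

-- ===== LEMMAS AND PROOFS =====

-- positions of '.' in cs at indices ≥ j, in increasing order
def dotsFrom (cs : List Char) (j : Nat) : List Nat :=
  if h : j < cs.length then
    if cs[j] = '.' then j :: dotsFrom cs (j + 1) else dotsFrom cs (j + 1)
  else []
termination_by cs.length - j

def endOf (cs : List Char) (l : List Nat) : Nat := l.headD cs.length

def emit (cs : List Char) (i a b : Nat) : List String :=
  (List.range' a (b - a)).map (fun q => String.ofList ((cs.drop i).take (q + 1 - i)))

-- what A's inner loop yields from position j with current dot count d
def innerSpec (cs : List Char) (i j d : Nat) : List String :=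
  match d with
  | 0 => match dotsFrom cs j with | _ :: _ :: p2 :: rest => emit cs i p2 (endOf cs rest) | _ => []
  | 1 => match dotsFrom cs j with | _ :: p2 :: rest => emit cs i p2 (endOf cs rest) | _ => []
  | 2 => match dotsFrom cs j with | p2 :: rest => emit cs i p2 (endOf cs rest) | _ => []
  | 3 => emit cs i j (endOf cs (dotsFrom cs j))
  | _ => []

-- total yields for starts i, i+1, …
def allSpec (cs : List Char) (i : Nat) : List String :=
  if i < cs.length then innerSpec cs i i 0 ++ allSpec cs (i + 1) else []
termination_by cs.length - i

theorem dotsFrom_ge (cs : List Char) :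
    ∀ n j, cs.length - j = n → ∀ x ∈ dotsFrom cs j, j ≤ x := by
  intro n
  induction n with
  | zero =>
    intro j hj x hx
    rw [dotsFrom, dif_neg (by omega : ¬ j < cs.length)] at hx
    simp at hx
  | succ n ih =>
    intro j hj x hx
    have h : j < cs.length := by omega
    rw [dotsFrom, dif_pos h] at hx
    split at hx
    · rcases List.mem_cons.mp hx with h1 | h1
      · omega
      · have := ih (j + 1) (by omega) x h1; omega
    · have := ih (j + 1) (by omega) x hx; omega

theorem dotsFrom_nil (cs : List Char) (j : Nat) (h : ¬ j < cs.length) :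
    dotsFrom cs j = [] := by
  rw [dotsFrom, dif_neg h]

theorem emit_nil (cs : List Char) (i a b : Nat) (h : b ≤ a) : emit cs i a b = [] := by
  simp [emit, Nat.sub_eq_zero_of_le h]

theorem emit_cons (cs : List Char) (i a b : Nat) (h : a < b) :
    emit cs i a b = String.ofList ((cs.drop i).take (a + 1 - i)) :: emit cs i (a + 1) b := by
  unfold emit
  rw [show b - a = (b - (a + 1)) + 1 by omega, List.range'_succ]
  simp

-- the head of dotsFrom cs (j+1), or cs.length, is strictly beyond j (for j < cs.length)
theorem endOf_dotsFrom_gt (cs : List Char) (j : Nat) (hj : j < cs.length) :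
    j < endOf cs (dotsFrom cs (j + 1)) := by
  rcases hX : dotsFrom cs (j + 1) with _ | ⟨a, l⟩
  · simpa [endOf] using hj
  · have : j + 1 ≤ a := by
      have := dotsFrom_ge cs (cs.length - (j + 1)) (j + 1) rfl a (by rw [hX]; simp)
      omega
    simpa [endOf] using by omega

-- unfolding lemma for pvA_inner in the j < cs.length case (the `let`s inlined; proof is rfl-like)
theorem pvA_inner_lt (cs : List Char) (i j dotNum : Nat) (acc : List String) (h : j < cs.length) :
    pvA_inner cs i j dotNum acc =
      if (if cs[j] = '.' then dotNum + 1 else dotNum) = 4 then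
        (if (if cs[j] = '.' then dotNum + 1 else dotNum) = 3 then
          acc ++ [String.ofList ((cs.drop i).take (j + 1 - i))] else acc)
      else
        pvA_inner cs i (j + 1) (if cs[j] = '.' then dotNum + 1 else dotNum)
          (if (if cs[j] = '.' then dotNum + 1 else dotNum) = 3 then
            acc ++ [String.ofList ((cs.drop i).take (j + 1 - i))] else acc) := by
  rw [pvA_inner, dif_pos h]

-- unfolding lemma for pvB_loop in the i < cs.length case (the `let`s inlined)
theorem pvB_loop_lt (cs : List Char) (dots : List Nat) (i k : Nat) (acc : List String)
    (h : i < cs.length) :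
    pvB_loop cs dots i k acc =
      pvB_loop cs dots (i + 1) (pvB_adv dots i k)
        (acc ++
          if _h : pvB_adv dots i k + 2 < dots.length then
            (List.range' dots[pvB_adv dots i k + 2]
              ((if _h3 : pvB_adv dots i k + 3 < dots.length then dots[pvB_adv dots i k + 3]
                else cs.length) - dots[pvB_adv dots i k + 2])).map
              (fun q => String.ofList ((cs.drop i).take (q + 1 - i)))
          else []) := by
  rw [pvB_loop, if_pos h]

theorem allSpec_pos (cs : List Char) (i : Nat) (h : i < cs.length) :
    allSpec cs i = innerSpec cs i i 0 ++ allSpec cs (i + 1) := by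
  rw [allSpec, if_pos h]

theorem allSpec_neg (cs : List Char) (i : Nat) (h : ¬ i < cs.length) :
    allSpec cs i = [] := by
  rw [allSpec, if_neg h]

theorem pvA_inner_spec (cs : List Char) (i : Nat) :
    ∀ n j d acc, cs.length - j = n → pvA_inner cs i j d acc = acc ++ innerSpec cs i j d := by
  intro n
  induction n with
  | zero =>
    intro j d acc hj
    have h : ¬ j < cs.length := by omega
    rw [pvA_inner, dif_neg h]
    rcases d with _ | _ | _ | _ | d <;>
      simp [innerSpec, dotsFrom_nil cs j h, endOf, emit, hj]
  | succ n ih =>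
    intro j d acc hj
    have h : j < cs.length := by omega
    have hd1 : cs.length - (j + 1) = n := by omega
    rw [pvA_inner_lt cs i j d acc h]
    by_cases hc : cs[j] = '.'
    · -- current char is a dot: dot_num increments
      have hD : dotsFrom cs j = j :: dotsFrom cs (j + 1) := by
        rw [dotsFrom, dif_pos h, if_pos hc]
      rw [if_pos hc]
      rcases d with _ | _ | _ | _ | d <;> split_ifs with h3 h4 <;> try (first | contradiction | omega)
      · -- 0 → 1
        rw [ih (j + 1) 1 acc hd1]
        simp only [innerSpec, hD]
        rcases dotsFrom cs (j + 1) with _ | ⟨a, _ | ⟨b, l⟩⟩ <;> rfl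
      · -- 1 → 2
        rw [ih (j + 1) 2 acc hd1]
        simp only [innerSpec, hD]
        rcases dotsFrom cs (j + 1) with _ | ⟨a, l⟩ <;> rfl
      · -- 2 → 3: this j is the third dot, the first yield of the run
        rw [ih (j + 1) 3 _ hd1]
        simp only [innerSpec, hD, List.append_assoc, List.singleton_append]
        rw [emit_cons cs i j _ (endOf_dotsFrom_gt cs j h)]
      · -- 3 → 4: stop, nothing yielded at j
        simp only [innerSpec, hD, endOf, List.headD_cons]
        rw [emit_nil cs i j j (le_refl j)]
        simp
      · -- counts ≥ 4 never yield again (unreachable from the top-level call)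
        rw [ih (j + 1) (d + 5) acc hd1]
        simp [innerSpec]
    · -- current char is not a dot: dot_num unchanged
      have hD : dotsFrom cs j = dotsFrom cs (j + 1) := by
        rw [dotsFrom, dif_pos h, if_neg hc]
      rw [if_neg hc]
      rcases d with _ | _ | _ | _ | d <;> split_ifs with h3 h4 <;> try (first | contradiction | omega)
      · rw [ih (j + 1) 0 acc hd1]
        simp only [innerSpec, hD]
      · rw [ih (j + 1) 1 acc hd1]
        simp only [innerSpec, hD]
      · rw [ih (j + 1) 2 acc hd1]
        simp only [innerSpec, hD]
      · -- count stays 3: yield at j and continue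
        rw [ih (j + 1) 3 _ hd1]
        simp only [innerSpec, hD, List.append_assoc, List.singleton_append]
        rw [emit_cons cs i j _ (endOf_dotsFrom_gt cs j h)]
      · -- original count 4: return acc unchanged
        simp [innerSpec]
      · -- original count > 4: continue, still yielding nothing
        rw [ih (j + 1) (d + 4) acc hd1]
        simp [innerSpec]

theorem pvA_outer_spec (cs : List Char) :
    ∀ n i acc, cs.length - i = n → pvA_outer cs i acc = acc ++ allSpec cs i := by
  intro n
  induction n with
  | zero =>
    intro i acc hi
    rw [pvA_outer, if_neg (by omega), allSpec_neg cs i (by omega)]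
    simp
  | succ n ih =>
    intro i acc hi
    have h : i < cs.length := by omega
    rw [pvA_outer, if_pos h, ih (i + 1) _ (by omega),
        pvA_inner_spec cs i (cs.length - i) i 0 acc rfl, allSpec_pos cs i h]
    simp

theorem dots_eq_dotsFrom_aux (cs : List Char) :
    ∀ n j, cs.length - j = n →
      (List.range' j (cs.length - j)).filter (fun p => cs[p]! == '.') = dotsFrom cs j := by
  intro n
  induction n with
  | zero =>
    intro j hj
    rw [hj, dotsFrom_nil cs j (by omega)]
    simp
  | succ n ih =>
    intro j hj
    have h : j < cs.length := by omega
    have hget : cs[j]! = cs[j] := getElem!_pos cs j h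
    rw [hj, List.range'_succ, List.filter_cons]
    rw [dotsFrom, dif_pos h]
    have hrec : (List.range' (j + 1) n).filter (fun p => cs[p]! == '.') = dotsFrom cs (j + 1) := by
      have := ih (j + 1) (by omega)
      rwa [show cs.length - (j + 1) = n by omega] at this
    by_cases hc : cs[j] = '.'
    · rw [if_pos (by simp [hget, hc]), if_pos hc, hrec]
    · rw [if_neg (by simp [hget, hc]), if_neg hc, hrec]

theorem dots_eq_dotsFrom (cs : List Char) :
    (List.range cs.length).filter (fun j => cs[j]! == '.') = dotsFrom cs 0 := by
  rw [List.range_eq_range']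
  simpa using dots_eq_dotsFrom_aux cs cs.length 0 rfl

theorem pvB_adv_drop (dots : List Nat) (i : Nat) :
    ∀ n k, dots.length - k = n →
      dots.drop (pvB_adv dots i k) = (dots.drop k).dropWhile (fun p => decide (p < i)) := by
  intro n
  induction n with
  | zero =>
    intro k hk
    rw [pvB_adv, dif_neg (by omega : ¬ k < dots.length)]
    rw [List.drop_eq_nil_of_le (by omega)]
    simp
  | succ n ih =>
    intro k hk
    have h : k < dots.length := by omega
    have hdrop : dots.drop k = dots[k] :: dots.drop (k + 1) := List.drop_eq_getElem_cons h
    rw [pvB_adv, dif_pos h]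
    by_cases hlt : dots[k] < i
    · rw [if_pos hlt, ih (k + 1) (by omega), hdrop, List.dropWhile_cons]
      simp [hlt]
    · rw [if_neg hlt, hdrop, List.dropWhile_cons]
      simp [hlt]

theorem dropWhile_eq_self_of_ge (i : Nat) (l : List Nat) (h : ∀ x ∈ l, i ≤ x) :
    l.dropWhile (fun p => decide (p < i)) = l := by
  cases l with
  | nil => rfl
  | cons x xs =>
    rw [List.dropWhile_cons]
    have : ¬ x < i := by have := h x (by simp); omega
    simp [this]

theorem dotsFrom_step (cs : List Char) (i : Nat) :
    (dotsFrom cs i).dropWhile (fun p => decide (p < i + 1)) = dotsFrom cs (i + 1) := by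
  by_cases hi : i < cs.length
  · have hge : ∀ x ∈ dotsFrom cs (i + 1), i + 1 ≤ x :=
      dotsFrom_ge cs (cs.length - (i + 1)) (i + 1) rfl
    rw [dotsFrom, dif_pos hi]
    by_cases hc : cs[i] = '.'
    · rw [if_pos hc, List.dropWhile_cons]
      simp only [show ((i < i + 1) = True) by simp, decide_true, if_true]
      exact dropWhile_eq_self_of_ge (i + 1) _ hge
    · rw [if_neg hc]
      exact dropWhile_eq_self_of_ge (i + 1) _ hge
  · rw [dotsFrom_nil cs i hi, dotsFrom_nil cs (i + 1) (by omega)]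
    rfl

theorem pvB_loop_spec (cs : List Char) (dots : List Nat) :
    ∀ n i k acc, cs.length - i = n →
      (dots.drop k).dropWhile (fun p => decide (p < i)) = dotsFrom cs i →
      pvB_loop cs dots i k acc = acc ++ allSpec cs i := by
  intro n
  induction n with
  | zero =>
    intro i k acc hi _
    rw [pvB_loop, if_neg (by omega), allSpec, if_neg (by omega)]
    simp
  | succ n ih =>
    intro i k acc hi hinv
    have h : i < cs.length := by omega
    rw [pvB_loop_lt cs dots i k acc h]
    have hk' : dots.drop (pvB_adv dots i k) = dotsFrom cs i := by
      rw [pvB_adv_drop dots i (dots.length - k) k rfl, hinv]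
    set k' := pvB_adv dots i k with hk'def
    have hinv' : (dots.drop k').dropWhile (fun p => decide (p < i + 1)) = dotsFrom cs (i + 1) := by
      rw [hk', dotsFrom_step]
    have hlen : dots.length - k' = (dotsFrom cs i).length := by
      rw [← hk', List.length_drop]
    rw [ih (i + 1) k' _ (by omega) hinv', allSpec_pos cs i h, List.append_assoc]
    congr 1
    -- the yields of this iteration equal innerSpec cs i i 0
    rcases hL : dotsFrom cs i with _ | ⟨p0, _ | ⟨p1, _ | ⟨p2, _ | ⟨p3, rest'⟩⟩⟩⟩ <;>
      (have hlen' := hlen; rw [hL] at hlen'; simp at hlen')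
    · rw [dif_neg (by omega)]
      simp [innerSpec, hL]
    · rw [dif_neg (by omega)]
      simp [innerSpec, hL]
    · rw [dif_neg (by omega)]
      simp [innerSpec, hL]
    · -- exactly three dots remain: the run extends to the end of the string
      have h2 : k' + 2 < dots.length := by omega
      rw [dif_pos h2, dif_neg (by omega : ¬ k' + 3 < dots.length)]
      have hg2 : dots[k' + 2] = p2 := by
        rw [List.getElem_eq_iff, ← List.getElem?_drop, hk', hL]; rfl
      simp only [innerSpec, hL, hg2, endOf, List.headD_nil]
      rfl
    · -- a fourth dot bounds the run
      have h2 : k' + 2 < dots.length := by omega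
      have h3 : k' + 3 < dots.length := by omega
      rw [dif_pos h2, dif_pos h3]
      have hg2 : dots[k' + 2] = p2 := by
        rw [List.getElem_eq_iff, ← List.getElem?_drop, hk', hL]; rfl
      have hg3 : dots[k' + 3] = p3 := by
        rw [List.getElem_eq_iff, ← List.getElem?_drop, hk', hL]; rfl
      simp only [innerSpec, hL, hg2, hg3, endOf, List.headD_cons]
      rfl

-- ===== VERDICT (by name: the statement is the Claim_ definition above) =====
theorem provide_all_seem_ipv4s_spec : Claim_equal_provide_all_seem_ipv4s := by
  intro text _
  unfold Spec_provide_all_seem_ipv4s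
  have hA : provide_all_seem_ipv4s text = pvA_outer text.toList 0 [] := rfl
  have hB : provide_all_seem_ipv4s_alt text =
      pvB_loop text.toList
        ((List.range text.toList.length).filter (fun j => text.toList[j]! == '.')) 0 0 [] := rfl
  rw [hA, hB, pvA_outer_spec text.toList (text.toList.length - 0) 0 [] rfl,
      pvB_loop_spec text.toList _ (text.toList.length - 0) 0 0 [] rfl
        (by rw [List.drop_zero, dots_eq_dotsFrom]
            exact dropWhile_eq_self_of_ge 0 _ (fun x _ => Nat.zero_le x))]
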